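-- pv_equiv track=rewrite | github.com/ghager93/ConcaveCurveShortening | bin/util/zhan_suen_neighbourhood_lookup_calculator.py | _number_of_01_patterns_in_ordered_neighbours_set
-- ===== SOURCE A (Python) =====
-- def _number_of_01_patterns_in_ordered_neighbours_set(n: int):
--     mask = 0b11000000
--     pattern = 0b01000000
--     cnt = 0
--     for i in range(7):
--         if mask & n == pattern:
--             cnt += 1
--         mask >>= 1
--         pattern >>= 1
--
--     if 0b10000001 & n == 0b10000000:
--         cnt += 1
--
--     return cnt
-- ===== SOURCE B (Python) =====
-- def _number_of_01_patterns_in_ordered_neighbours_set(n: int):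
--     # Count circular 0->1 transitions (MSB-first) with a branch-free bit trick:
--     # rotate the 8-bit word left by one, AND with the complement, then popcount
--     # the result with a SWAR reduction (no loop, no per-pair test).
--     m = n & 0xFF
--     rot = ((m << 1) | (m >> 7)) & 0xFF
--     x = m & (rot ^ 0xFF)
--     x = (x & 0x55) + ((x >> 1) & 0x55)
--     x = (x & 0x33) + ((x >> 2) & 0x33)
--     return (x & 0x0F) + (x >> 4)
-- ===== Notes on version B (the rewrite author's own statement) =====
-- stated objective: alternative
-- what changed: A's 7-iteration loop of masked pair comparisons plus a hard-coded wraparound test is replaced by a branch-free bit trick: AND the 8-bit word with the complement of its left rotation and popcount the result via a SWAR reduction, so no pair is ever tested individually.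
import Mathlib
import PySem

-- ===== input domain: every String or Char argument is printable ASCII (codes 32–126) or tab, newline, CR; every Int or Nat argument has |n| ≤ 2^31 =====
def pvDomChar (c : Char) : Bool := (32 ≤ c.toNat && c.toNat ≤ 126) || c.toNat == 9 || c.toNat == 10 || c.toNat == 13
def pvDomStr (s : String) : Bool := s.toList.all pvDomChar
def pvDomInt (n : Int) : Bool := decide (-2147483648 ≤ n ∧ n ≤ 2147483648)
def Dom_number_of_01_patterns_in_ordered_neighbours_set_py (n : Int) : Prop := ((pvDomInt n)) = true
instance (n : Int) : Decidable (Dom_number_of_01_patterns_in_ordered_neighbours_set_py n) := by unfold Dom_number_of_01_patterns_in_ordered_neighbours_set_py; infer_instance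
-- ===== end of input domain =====

-- B replaces A's 7-step masked pair-testing loop plus separate wraparound check with a
-- branch-free bit trick: rotate the 8-bit word left by one, AND with its complement,
-- and popcount the result with a SWAR reduction (no loop, no per-pair comparison).
-- Objective: alternative (genuinely different algorithm, same O(1) cost).

-- ===== PORT A =====
-- loop body of A: check `mask & n == pattern`, then shift mask and pattern right by one
def pyStepA (n : Int) (st : Int × Int × Int) (_ : Int) : Int × Int × Int :=
  if PySem.Int.band st.1 n = st.2.1 then (st.1 >>> (1:ℕ), st.2.1 >>> (1:ℕ), st.2.2 + 1)
  else (st.1 >>> (1:ℕ), st.2.1 >>> (1:ℕ), st.2.2)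

def number_of_01_patterns_in_ordered_neighbours_set_py (n : Int) : Int :=
  let s := (PySem.List.pyRange 0 7).foldl (pyStepA n) (192, 64, 0)
  if PySem.Int.band 129 n = 128 then s.2.2 + 1 else s.2.2

-- ===== PORT B =====
def number_of_01_patterns_in_ordered_neighbours_set_py_alt (n : Int) : Int :=
  let m := PySem.Int.band n 255
  let rot := PySem.Int.band (PySem.Int.bor (m <<< (1:ℕ)) (m >>> (7:ℕ))) 255
  let x := PySem.Int.band m (PySem.Int.bxor rot 255)
  let x := PySem.Int.band x 85 + PySem.Int.band (x >>> (1:ℕ)) 85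
  let x := PySem.Int.band x 51 + PySem.Int.band (x >>> (2:ℕ)) 51
  PySem.Int.band x 15 + (x >>> (4:ℕ))

-- ===== PRECONDITION & SPEC =====
def Spec_number_of_01_patterns_in_ordered_neighbours_set_py (n : Int) (out : Int) : Prop := out = number_of_01_patterns_in_ordered_neighbours_set_py_alt n
instance (n : Int) (out : Int) : Decidable (Spec_number_of_01_patterns_in_ordered_neighbours_set_py n out) := by unfold Spec_number_of_01_patterns_in_ordered_neighbours_set_py; infer_instance

-- ===== CLAIM (what is proved, stated in full; the proofs are below) =====
def Claim_equal_number_of_01_patterns_in_ordered_neighbours_set_py : Prop := ∀ (n : Int), Dom_number_of_01_patterns_in_ordered_neighbours_set_py n → Spec_number_of_01_patterns_in_ordered_neighbours_set_py n (number_of_01_patterns_in_ordered_neighbours_set_py n)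

-- ===== LEMMAS AND PROOFS =====

-- a mask below 2^8 only reads the low 8 bits of its Nat operand
theorem pv_and_mod (m x : ℕ) (hm : m < 256) : m &&& x = m &&& (x % 256) := by
  apply Nat.eq_of_testBit_eq
  intro i
  rw [Nat.testBit_and, Nat.testBit_and, show (256:ℕ) = 2^8 from rfl,
    Nat.testBit_mod_two_pow]
  rcases lt_or_ge i 8 with h | h
  · simp [h]
  · have h2 : (256:ℕ) ≤ 2^i := by
      calc (256:ℕ) = 2^8 := rfl
      _ ≤ 2^i := Nat.pow_le_pow_right (by norm_num) h
    have hm' : m.testBit i = false := Nat.testBit_lt_two_pow (lt_of_lt_of_le hm h2)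
    simp [hm']

-- bit-level decomposition of &&& used for the complement identity
theorem pv_bit_key (a b : Bool) (x y : ℕ) :
    (2*x + a.toNat) &&& (2*y + b.toNat) = 2*(x &&& y) + (a && b).toNat := by
  have := Nat.land_bit a x b y
  simpa [Nat.bit_val, Nat.mul_comm] using this

theorem pv_and_compl_gen : ∀ (k m r : ℕ), m < 2^k → r < 2^k →
    (m &&& r) + (m &&& (2^k - 1 - r)) = m := by
  intro k
  induction k with
  | zero =>
    intro m r hm hr
    have hm0 : m = 0 := by omega
    have hr0 : r = 0 := by omega
    subst hm0; subst hr0; decide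
  | succ k ih =>
    intro m r hm hr
    have hpow : (2:ℕ)^(k+1) = 2 * 2^k := by ring
    set a : Bool := decide (m % 2 = 1) with ha
    set b : Bool := decide (r % 2 = 1) with hb
    have hat : a.toNat = m % 2 := by
      rcases Nat.mod_two_eq_zero_or_one m with h | h <;> simp [ha, h]
    have hbt : b.toNat = r % 2 := by
      rcases Nat.mod_two_eq_zero_or_one r with h | h <;> simp [hb, h]
    have hbt' : (!b).toNat = 1 - r % 2 := by
      rcases Nat.mod_two_eq_zero_or_one r with h | h <;> simp [hb, h]
    have hm' : m = 2*(m/2) + a.toNat := by omega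
    have hr' : r = 2*(r/2) + b.toNat := by omega
    have hc : 2^(k+1) - 1 - r = 2*(2^k - 1 - r/2) + (!b).toNat := by
      have hr2 : r/2 < 2^k := by omega
      omega
    have h1 : m &&& r = 2*(m/2 &&& r/2) + (a && b).toNat := by
      conv_lhs => rw [hm', hr']
      exact pv_bit_key a b (m/2) (r/2)
    have h2 : m &&& (2^(k+1) - 1 - r) = 2*(m/2 &&& (2^k - 1 - r/2)) + (a && !b).toNat := by
      conv_lhs => rw [hm', hc]
      exact pv_bit_key a (!b) (m/2) (2^k - 1 - r/2)
    have hih := ih (m/2) (r/2) (by omega) (by omega)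
    have habs : (a && b).toNat + (a && !b).toNat = a.toNat := by
      cases a <;> cases b <;> decide
    omega

theorem pv_and_compl (m r : Fin 256) : (m.val &&& r.val) + (m.val &&& (255 - r.val)) = m.val := by
  have := pv_and_compl_gen 8 m.val r.val (by omega) (by omega)
  norm_num at this
  exact this

-- Python's `m & n` with 0 ≤ m < 256 depends only on n mod 256 (both signs of n)
theorem pv_band_mod (m : ℕ) (hm : m < 256) (n : ℤ) :
    PySem.Int.band (m : ℤ) n = PySem.Int.band (m : ℤ) (n % 256) := by
  have hr0 : 0 ≤ n % 256 := Int.emod_nonneg n (by norm_num)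
  have hr1 : n % 256 < 256 := Int.emod_lt_of_pos n (by norm_num)
  by_cases hn : 0 ≤ n
  · rw [PySem.Int.band, PySem.Int.band]
    rw [if_pos (by positivity), if_pos hn, if_pos (by positivity), if_pos hr0]
    have h1 : ((m:ℤ)).toNat = m := Int.toNat_natCast m
    have h2 : (n % 256).toNat = n.toNat % 256 := by omega
    rw [h1, h2, ← pv_and_mod m n.toNat hm]
  · rw [PySem.Int.band, PySem.Int.band]
    rw [if_pos (by positivity), if_neg (by omega), if_pos (by positivity), if_pos hr0]
    have h1 : ((m:ℤ)).toNat = m := Int.toNat_natCast m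
    set y := (-n - 1).toNat with hy
    have hyn : (y : ℤ) = -n - 1 := by omega
    have h2 : (n % 256).toNat = 255 - y % 256 := by omega
    have h3 : y % 256 < 256 := Nat.mod_lt _ (by norm_num)
    rw [h1, h2]
    have := pv_and_compl ⟨m, hm⟩ ⟨y % 256, h3⟩
    simp only [] at this
    have h4 : m &&& y = m &&& (y % 256) := pv_and_mod m y hm
    omega

-- A's fold only consults n through `band mask n` with 0 ≤ mask < 256 (invariant under the shift)
theorem foldA_mod (n : ℤ) (l : List ℤ) (st : Int × Int × Int) (h1 : 0 ≤ st.1) (h2 : st.1 < 256) :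
    l.foldl (pyStepA n) st = l.foldl (pyStepA (n % 256)) st := by
  induction l generalizing st with
  | nil => rfl
  | cons a l ih =>
    have hb := pv_band_mod st.1.toNat (by omega) n
    rw [Int.toNat_of_nonneg h1] at hb
    have hstep : pyStepA n st a = pyStepA (n % 256) st a := by
      simp only [pyStepA, hb]
    have hsh : (st.1 >>> (1:ℕ)) = st.1 / 2 := by
      rw [Int.shiftRight_eq_div_pow]; norm_num
    rw [List.foldl_cons, List.foldl_cons, hstep]
    apply ih
    · simp only [pyStepA]; split_ifs <;> simp [hsh] <;> omega
    · simp only [pyStepA]; split_ifs <;> simp [hsh] <;> omega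

theorem A_mod (n : ℤ) : number_of_01_patterns_in_ordered_neighbours_set_py n = number_of_01_patterns_in_ordered_neighbours_set_py (n % 256) := by
  have hf := foldA_mod n (PySem.List.pyRange 0 7) (192, 64, 0) (by norm_num) (by norm_num)
  have h129 := pv_band_mod 129 (by norm_num) n
  norm_num at h129
  simp only [number_of_01_patterns_in_ordered_neighbours_set_py, hf, h129]

-- B reads n only through `n & 255`, which depends only on n mod 256
theorem B_mod (n : ℤ) : number_of_01_patterns_in_ordered_neighbours_set_py_alt n = number_of_01_patterns_in_ordered_neighbours_set_py_alt (n % 256) := by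
  have h : PySem.Int.band n 255 = PySem.Int.band (n % 256) 255 := by
    rw [PySem.Int.band_comm n 255, PySem.Int.band_comm (n % 256) 255]
    exact pv_band_mod 255 (by norm_num) n
  simp only [number_of_01_patterns_in_ordered_neighbours_set_py_alt, h]

set_option maxRecDepth 4000 in
theorem AB_small : ∀ r : Fin 256, number_of_01_patterns_in_ordered_neighbours_set_py (r : ℤ) = number_of_01_patterns_in_ordered_neighbours_set_py_alt (r : ℤ) := by decide

-- ===== VERDICT (by name: the statement is the Claim_ definition above) =====
theorem number_of_01_patterns_in_ordered_neighbours_set_py_spec : Claim_equal_number_of_01_patterns_in_ordered_neighbours_set_py := by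
  intro n _hd
  unfold Spec_number_of_01_patterns_in_ordered_neighbours_set_py
  rw [A_mod, B_mod]
  have hr0 : 0 ≤ n % 256 := Int.emod_nonneg n (by norm_num)
  have hr1 : n % 256 < 256 := Int.emod_lt_of_pos n (by norm_num)
  have := AB_small ⟨(n % 256).toNat, by omega⟩
  simpa [Int.toNat_of_nonneg hr0] using this
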